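-- pv_equiv track=rewrite | github.com/scibei/pythonWorldeSolver | wordleSolver.py | badPos
-- ===== SOURCE A (Python) =====
-- def badPos(bad_pos, good_words):
--     bad_words = []
--     for key, i in zip(bad_pos, range(0, 5, 1)):
--         letters = bad_pos.get(key)
--         if letters == None:
--             continue
--         for letter in letters:
--             for word in good_words:
--                 if letter in word[i]:
--                     bad_words.append(word)
--     return bad_words
-- ===== SOURCE B (Python) =====
-- def badPos(bad_pos, good_words):
--     # Index each word once under (position, letter); every (position, letter)
--     # query is then a single dict lookup instead of a scan of good_words.
--     idx = {}
--     for w in good_words: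
--         for i, c in enumerate(w[:5]):
--             idx.setdefault((i, c), []).append(w)
--     bad_words = []
--     for letters, i in zip(bad_pos.values(), range(0, 5, 1)):
--         for letter in letters:
--             bad_words += idx.get((i, letter), [])
--     return bad_words
-- ===== Notes on version B (the rewrite author's own statement) =====
-- stated objective: alternative
-- what changed: Instead of rescanning all of good_words for every (position, letter) pair, B indexes good_words once by (position, character) into a dict and replaces each inner scan by a single lookup; the lookups beat the rescans only when many letters are flagged, so no speed is claimed.
-- intended difference: On inputs where one of the first five bad-position letter lists contains the empty string and good_words is nonempty, A appends every word of good_words (Python's '"" in word[i]' is vacuously true) while B appends nothing; an empty string names no letter, so matching no word is the intended behaviour. — e.g. on badPos([("a", [""])], ["ax"]): A returns ["ax"], B returns []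
import Mathlib
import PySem

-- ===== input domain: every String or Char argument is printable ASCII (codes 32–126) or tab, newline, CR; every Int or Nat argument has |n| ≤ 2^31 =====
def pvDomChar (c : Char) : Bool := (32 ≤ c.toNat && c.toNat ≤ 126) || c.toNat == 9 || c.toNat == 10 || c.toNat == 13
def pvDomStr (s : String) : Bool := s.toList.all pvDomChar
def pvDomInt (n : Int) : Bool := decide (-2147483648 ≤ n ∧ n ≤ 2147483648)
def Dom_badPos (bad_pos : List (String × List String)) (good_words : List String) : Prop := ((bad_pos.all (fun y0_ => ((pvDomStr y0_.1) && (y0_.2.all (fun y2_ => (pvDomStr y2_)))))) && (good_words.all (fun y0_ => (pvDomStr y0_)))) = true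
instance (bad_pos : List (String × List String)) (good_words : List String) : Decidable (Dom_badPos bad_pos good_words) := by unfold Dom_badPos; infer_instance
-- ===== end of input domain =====

-- B replaces A's per-letter rescans of good_words by one precomputed (position, char) → word-list index (alternative algorithm, same result except on empty-string "letters", stated as D_ below).

-- ===== PORT A =====
-- literal port of A: iterate the dict's keys zipped with range(0,5,1), look each key up,
-- then for each letter scan good_words testing `letter in word[i]` (word[i] can raise IndexError: Pre_ excludes that).
def badPos (bad_pos : List (String × List String)) (good_words : List String) : List String :=
  let d : PySem.Dict String (List String) := PySem.Dict.ofList bad_pos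
  (d.keys.zip (PySem.List.pyRange 0 5 1)).foldl (fun bw ki =>
    match d.get? ki.1 with
    | none => bw
    | some letters =>
      letters.foldl (fun bw letter =>
        good_words.foldl (fun bw word =>
          match PySem.Str.pyGet? word ki.2 with
          | none => bw   -- IndexError in Python; such inputs are outside Pre_badPos
          | some c => if PySem.Str.isIn letter (String.ofList [c]) then bw ++ [word] else bw) bw) bw) []

-- ===== PORT B =====
-- port of Source B: build the (position, char) → word-list index in one pass, then the main loop only looks up.
-- idx.setdefault((i, c), []).append(w)  is  Dict.modify (i, c) [] (· ++ [w])
def pvBuildIdx (good_words : List String) : PySem.Dict (Int × String) (List String) :=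
  good_words.foldl (fun d w =>
    (PySem.List.enumerate (w.toList.take 5) 0).foldl
      (fun d p => d.modify (p.1, String.ofList [p.2]) [] (· ++ [w])) d) PySem.Dict.empty

def badPos_alt (bad_pos : List (String × List String)) (good_words : List String) : List String :=
  let idx := pvBuildIdx good_words
  let d : PySem.Dict String (List String) := PySem.Dict.ofList bad_pos
  (d.values.zip (PySem.List.pyRange 0 5 1)).foldl (fun bw li =>
    li.1.foldl (fun bw letter => bw ++ idx.getD (li.2, letter) []) bw) []

-- ===== PRECONDITION & SPEC =====
-- Pre_ excludes exactly the inputs on which A raises IndexError: one of the first five dict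
-- entries carries a nonempty letter list while some word of good_words is too short for that position.
def Pre_badPos (bad_pos : List (String × List String)) (good_words : List String) : Prop :=
  ∀ p ∈ (PySem.Dict.ofList bad_pos).items.zip (PySem.List.pyRange 0 5 1),
    p.1.2 ≠ [] → ∀ w ∈ good_words, p.2 < (w.toList.length : Int)
instance (bad_pos : List (String × List String)) (good_words : List String) : Decidable (Pre_badPos bad_pos good_words) := by unfold Pre_badPos; infer_instance
def pvWitness_badPos : (List (String × List String)) × List String := ([("a", ["x", "z"])], ["xyzzy", "axe"])

-- On inputs where one of the first five bad-position letter lists contains the empty string and good_words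
-- is nonempty, A appends every word of good_words (Python's '"" in word[i]' is vacuously true) while B
-- appends nothing; an empty string names no letter, so matching no word is the intended behaviour.
def D_badPos (bad_pos : List (String × List String)) (good_words : List String) : Prop :=
  good_words ≠ [] ∧
    ∃ p ∈ (PySem.Dict.ofList bad_pos).items.zip (PySem.List.pyRange 0 5 1), "" ∈ p.1.2
instance (bad_pos : List (String × List String)) (good_words : List String) : Decidable (D_badPos bad_pos good_words) := by unfold D_badPos; infer_instance

def Spec_badPos (bad_pos : List (String × List String)) (good_words : List String) (out : List String) : Prop := ¬ D_badPos bad_pos good_words → out = badPos_alt bad_pos good_words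
instance (bad_pos : List (String × List String)) (good_words : List String) (out : List String) : Decidable (Spec_badPos bad_pos good_words out) := by unfold Spec_badPos; infer_instance

def pvDiffWitness_badPos : (List (String × List String)) × List String := ([("a", [""])], ["ax"])
def pvDiffWitnessOut_badPos : (List String) × (List String) := (["ax"], [])

-- ===== CLAIM (what is proved, stated in full; the proofs are below) =====
def Claim_unchanged_badPos : Prop := ∀ (bad_pos : List (String × List String)) (good_words : List String), Dom_badPos bad_pos good_words → Pre_badPos bad_pos good_words → Spec_badPos bad_pos good_words (badPos bad_pos good_words)
def Claim_changed_badPos : Prop := Dom_badPos (pvDiffWitness_badPos.1) (pvDiffWitness_badPos.2) ∧ Pre_badPos (pvDiffWitness_badPos.1) (pvDiffWitness_badPos.2) ∧ D_badPos (pvDiffWitness_badPos.1) (pvDiffWitness_badPos.2) ∧ badPos (pvDiffWitness_badPos.1) (pvDiffWitness_badPos.2) = pvDiffWitnessOut_badPos.1 ∧ badPos_alt (pvDiffWitness_badPos.1) (pvDiffWitness_badPos.2) = pvDiffWitnessOut_badPos.2 ∧ pvDiffWitnessOut_badPos.1 ≠ pvDiffWitnessOut_badPos.2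
def Claim_exact_badPos : Prop := ∀ (bad_pos : List (String × List String)) (good_words : List String), Dom_badPos bad_pos good_words → Pre_badPos bad_pos good_words → D_badPos bad_pos good_words → badPos bad_pos good_words ≠ badPos_alt bad_pos good_words

-- ===== LEMMAS AND PROOFS =====

-- `letter in c` for a single-character string c and letter ≠ ""
theorem pv_isIn_single (letter : String) (c : Char) (h : letter ≠ "") :
    PySem.Str.isIn letter (String.ofList [c]) = (String.ofList [c] == letter) := by
  have hl : letter.toList ≠ [] := by
    intro hnil
    exact h (by rw [← String.ofList_toList (s := letter), hnil])
  have hiff : PySem.Str.isIn letter (String.ofList [c]) = true ↔ (String.ofList [c] == letter) = true := by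
    rw [PySem.Str.isIn_iff_infix, beq_iff_eq]
    simp only [String.toList_ofList, List.infix_singleton_iff]
    constructor
    · rintro (h1 | h1)
      · exact absurd h1 hl
      · rw [← String.ofList_toList (s := letter), h1]
    · intro h1; right; rw [← h1]; simp
  cases hA : PySem.Str.isIn letter (String.ofList [c]) <;>
    cases hB : (String.ofList [c] == letter) <;> simp_all

theorem pv_isIn_empty (s : String) : PySem.Str.isIn "" s = true := by
  rw [PySem.Str.isIn_iff_infix]
  simp

theorem pv_single_ne_empty (c : Char) : (String.ofList [c] == "") = false := by
  apply beq_eq_false_iff_ne.mpr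
  intro h
  have := congrArg String.toList h
  simp at this

-- the single entry a word contributes at position (i - j) inside an enumerate-fold
theorem pv_filt_enum (cs : List Char) (j i : Int) (q : Char → Bool) :
    (PySem.List.enumerate cs j).filter (fun p => p.1 == i && q p.2) =
      if 0 ≤ i - j then (((cs[(i - j).toNat]?).filter q).map (fun c => (i, c))).toList
      else [] := by
  induction cs generalizing j with
  | nil => simp [PySem.List.enumerate]
  | cons c cs ih =>
    rw [PySem.List.enumerate_cons, List.filter_cons, ih (j + 1)]
    by_cases hij : i = j
    · subst hij
      simp only [sub_self, beq_self_eq_true, Bool.true_and]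
      by_cases hq : q c <;> simp [hq, Option.filter]
    · have hb : (j == i) = false := beq_eq_false_iff_ne.mpr (fun h => hij h.symm)
      simp only [hb, Bool.false_and, if_neg Bool.false_ne_true]
      by_cases h0 : 0 ≤ i - j
      · have h0' : 0 ≤ i - (j + 1) := by omega
        have ht : (i - j).toNat = (i - (j + 1)).toNat + 1 := by omega
        rw [if_pos h0, if_pos h0', ht]
        simp
      · rw [if_neg h0, if_neg (show ¬ 0 ≤ i - (j + 1) by omega)]

-- indexing one word w touches the bucket (i, s) exactly when w's character at i spells s
theorem pv_step (w : String) (d : PySem.Dict (Int × String) (List String)) (i : Int) (s : String)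
    (hi0 : 0 ≤ i) (hi5 : i < 5) (hw : i < (w.toList.length : Int)) :
    ((PySem.List.enumerate (w.toList.take 5) 0).foldl
        (fun d p => d.modify (p.1, String.ofList [p.2]) [] (· ++ [w])) d).getD (i, s) []
    = d.getD (i, s) [] ++ (if String.ofList [w.toList.getD i.toNat ' '] == s then [w] else []) := by
  have hmap : (PySem.List.enumerate (w.toList.take 5) 0).foldl
      (fun d p => d.modify (p.1, String.ofList [p.2]) [] (· ++ [w])) d
    = ((PySem.List.enumerate (w.toList.take 5) 0).map (fun p => ((p.1, String.ofList [p.2]), w))).foldl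
        (fun d p => d.modify p.1 [] (· ++ [p.2])) d := by
    rw [List.foldl_map]
  rw [hmap, PySem.Dict.getD_foldl_modify_append, List.filter_map]
  have hpred : ((fun (p : (Int × String) × String) => p.1 == (i, s)) ∘ (fun p => ((p.1, String.ofList [p.2]), w)))
      = (fun (p : Int × Char) => p.1 == i && (fun c => String.ofList [c] == s) p.2) := by
    funext p; rfl
  rw [hpred, pv_filt_enum (w.toList.take 5) 0 i (fun c => String.ofList [c] == s), if_pos (by omega)]
  have hidx : (w.toList.take 5)[(i - 0).toNat]? = some (w.toList.getD i.toNat ' ') := by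
    rw [List.getElem?_take]
    have h2 : i.toNat < w.toList.length := by omega
    have h3 : i.toNat < 5 := by omega
    simp [h3, List.getElem?_eq_getElem h2, List.getD]
  rw [hidx]
  simp only [Option.filter, List.getD]
  split_ifs <;> simp

-- the bucket of pvBuildIdx at (i, s) is the in-order sublist of words whose i-th character spells s
theorem pv_bucket_aux (gws : List String) (d : PySem.Dict (Int × String) (List String)) (i : Int) (s : String)
    (hi0 : 0 ≤ i) (hi5 : i < 5) (hw : ∀ w ∈ gws, i < (w.toList.length : Int)) :
    (gws.foldl (fun d w => (PySem.List.enumerate (w.toList.take 5) 0).foldl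
        (fun d p => d.modify (p.1, String.ofList [p.2]) [] (· ++ [w])) d) d).getD (i, s) []
    = d.getD (i, s) [] ++ gws.filter (fun w => String.ofList [w.toList.getD i.toNat ' '] == s) := by
  induction gws generalizing d with
  | nil => simp
  | cons w gws ih =>
    rw [List.foldl_cons, ih _ (fun w hw' => hw w (List.mem_cons_of_mem _ hw')),
      pv_step w d i s hi0 hi5 (hw w List.mem_cons_self), List.filter_cons, List.append_assoc]
    split_ifs <;> simp

theorem pv_bucket (gws : List String) (i : Int) (s : String)
    (hi0 : 0 ≤ i) (hi5 : i < 5) (hw : ∀ w ∈ gws, i < (w.toList.length : Int)) :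
    (pvBuildIdx gws).getD (i, s) []
    = gws.filter (fun w => String.ofList [w.toList.getD i.toNat ' '] == s) := by
  rw [pvBuildIdx, pv_bucket_aux gws _ i s hi0 hi5 hw]
  simp

-- A's inner scan of good_words collects, in order, the words whose i-th character contains letter
theorem pv_scan (gws : List String) (letter : String) (i : Int) (acc : List String)
    (hi0 : 0 ≤ i) (hw : ∀ w ∈ gws, i < (w.toList.length : Int)) :
    gws.foldl (fun bw word => match PySem.Str.pyGet? word i with
      | none => bw
      | some c => if PySem.Str.isIn letter (String.ofList [c]) then bw ++ [word] else bw) acc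
    = acc ++ gws.filter (fun w => PySem.Str.isIn letter (String.ofList [w.toList.getD i.toNat ' '])) := by
  have hg : ∀ w ∈ gws, PySem.Str.pyGet? w i = some (w.toList.getD i.toNat ' ') := by
    intro w hwmem
    rw [PySem.Str.pyGet?_eq, show PySem.Chars.pyGet? = PySem.List.pyGet? (α := Char) from rfl,
      PySem.List.pyGet?_of_nonneg _ hi0]
    have h2 : i.toNat < w.toList.length := by
      have := hw w hwmem; omega
    simp [List.getElem?_eq_getElem h2, List.getD]
  rw [PySem.List.foldl_congr_mem gws _
      (fun bw word => if PySem.Str.isIn letter (String.ofList [word.toList.getD i.toNat ' ']) then bw ++ [word] else bw) acc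
      (by intro a w hw'; rw [hg w hw'])]
  exact (PySem.List.foldl_append_if _ id gws acc).trans (by simp)

-- flat-map normal form of port A under Pre_
theorem pv_A_flat (bad_pos : List (String × List String)) (gws : List String)
    (hpre : Pre_badPos bad_pos gws) :
    badPos bad_pos gws
    = ((PySem.Dict.ofList bad_pos).items.zip (PySem.List.pyRange 0 5 1)).flatMap
        (fun p => p.1.2.flatMap (fun l =>
          gws.filter (fun w => PySem.Str.isIn l (String.ofList [w.toList.getD p.2.toNat ' '])))) := by
  unfold badPos
  set d := PySem.Dict.ofList bad_pos with hd
  dsimp only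
  rw [show d.keys = d.items.map (·.1) from rfl, List.zip_map_left, List.foldl_map]
  have h1 : (d.items.zip (PySem.List.pyRange 0 5 1)).foldl
      (fun bw p => match d.get? (Prod.map (·.1) id p).1 with
        | none => bw
        | some letters => letters.foldl (fun bw letter =>
            gws.foldl (fun bw word => match PySem.Str.pyGet? word (Prod.map (·.1) id p).2 with
              | none => bw
              | some c => if PySem.Str.isIn letter (String.ofList [c]) then bw ++ [word] else bw) bw) bw) []
    = (d.items.zip (PySem.List.pyRange 0 5 1)).foldl
      (fun bw p => bw ++ p.1.2.flatMap (fun l =>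
        gws.filter (fun w => PySem.Str.isIn l (String.ofList [w.toList.getD p.2.toNat ' '])))) [] := by
    apply PySem.List.foldl_congr_mem
    intro acc p hp
    obtain ⟨hpi, hpr⟩ := List.of_mem_zip hp
    obtain ⟨hi0, hi5⟩ := PySem.List.mem_pyRange_one.mp hpr
    dsimp only [Prod.map, id_eq]
    have hget : d.get? p.1.1 = some p.1.2 :=
      PySem.Dict.get?_of_mem_items d (by simpa using hpi) (PySem.Dict.nodup_keys_ofList _)
    rw [hget]
    dsimp only
    have h2 : ∀ (acc2 : List String), ∀ l ∈ p.1.2,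
        gws.foldl (fun bw word => match PySem.Str.pyGet? word p.2 with
          | none => bw
          | some c => if PySem.Str.isIn l (String.ofList [c]) then bw ++ [word] else bw) acc2
        = acc2 ++ gws.filter (fun w => PySem.Str.isIn l (String.ofList [w.toList.getD p.2.toNat ' '])) := by
      intro acc2 l hl
      exact pv_scan gws l p.2 acc2 hi0 (hpre p hp (List.ne_nil_of_mem hl))
    rw [PySem.List.foldl_congr_mem p.1.2 _
        (fun bw l => bw ++ gws.filter (fun w => PySem.Str.isIn l (String.ofList [w.toList.getD p.2.toNat ' ']))) acc
        (fun a x hx => h2 a x hx),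
      PySem.List.foldl_append_eq_flatMap]
  rw [h1, PySem.List.foldl_append_eq_flatMap]
  simp

-- flat-map normal form of port B under Pre_
theorem pv_B_flat (bad_pos : List (String × List String)) (gws : List String)
    (hpre : Pre_badPos bad_pos gws) :
    badPos_alt bad_pos gws
    = ((PySem.Dict.ofList bad_pos).items.zip (PySem.List.pyRange 0 5 1)).flatMap
        (fun p => p.1.2.flatMap (fun l =>
          gws.filter (fun w => String.ofList [w.toList.getD p.2.toNat ' '] == l))) := by
  unfold badPos_alt
  set d := PySem.Dict.ofList bad_pos with hd
  dsimp only
  rw [show d.values = d.items.map Prod.snd from rfl, List.zip_map_left, List.foldl_map]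
  have h1 : (d.items.zip (PySem.List.pyRange 0 5 1)).foldl
      (fun bw p => (Prod.map Prod.snd id p).1.foldl
        (fun bw letter => bw ++ (pvBuildIdx gws).getD ((Prod.map Prod.snd id p).2, letter) []) bw) []
    = (d.items.zip (PySem.List.pyRange 0 5 1)).foldl
      (fun bw p => bw ++ p.1.2.flatMap (fun l =>
        gws.filter (fun w => String.ofList [w.toList.getD p.2.toNat ' '] == l))) [] := by
    apply PySem.List.foldl_congr_mem
    intro acc p hp
    obtain ⟨hpi, hpr⟩ := List.of_mem_zip hp
    obtain ⟨hi0, hi5⟩ := PySem.List.mem_pyRange_one.mp hpr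
    show p.1.2.foldl _ acc = _
    rw [PySem.List.foldl_congr_mem p.1.2 _
        (fun bw l => bw ++ gws.filter (fun w => String.ofList [w.toList.getD p.2.toNat ' '] == l)) acc
        (by
          intro a l hl
          show a ++ (pvBuildIdx gws).getD (p.2, l) [] = _
          rw [pv_bucket gws p.2 l hi0 hi5 (hpre p hp (List.ne_nil_of_mem hl))]),
      PySem.List.foldl_append_eq_flatMap]
  rw [h1, PySem.List.foldl_append_eq_flatMap]
  simp

theorem pv_sum_le {α : Type} (L : List α) (f g : α → Nat)
    (hle : ∀ x ∈ L, f x ≤ g x) : (L.map f).sum ≤ (L.map g).sum := by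
  induction L with
  | nil => simp
  | cons y L ih =>
    simp only [List.map_cons, List.sum_cons]
    have h1 := hle y List.mem_cons_self
    have h2 := ih (fun x hx' => hle x (List.mem_cons_of_mem _ hx'))
    omega

theorem pv_sum_lt {α : Type} (L : List α) (f g : α → Nat)
    (hle : ∀ x ∈ L, f x ≤ g x) (x₀ : α) (hx : x₀ ∈ L) (hlt : f x₀ < g x₀) :
    (L.map f).sum < (L.map g).sum := by
  induction L with
  | nil => cases hx
  | cons y L ih =>
    simp only [List.map_cons, List.sum_cons]
    rcases List.mem_cons.mp hx with h | h
    · subst h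
      have := pv_sum_le L f g (fun x hx' => hle x (List.mem_cons_of_mem _ hx'))
      omega
    · have h1 := hle y List.mem_cons_self
      have h2 := ih (fun x hx' => hle x (List.mem_cons_of_mem _ hx')) h
      omega

-- per-letter comparison of the two filters
theorem pv_filters (gws : List String) (i : Int) (l : String) :
    (gws.filter (fun w => String.ofList [w.toList.getD i.toNat ' '] == l)).length
      ≤ (gws.filter (fun w => PySem.Str.isIn l (String.ofList [w.toList.getD i.toNat ' ']))).length := by
  by_cases hl : l = ""
  · subst hl
    have hB : gws.filter (fun w => String.ofList [w.toList.getD i.toNat ' '] == "") = [] := by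
      apply List.filter_eq_nil_iff.mpr
      intro w _
      simp [pv_single_ne_empty]
    rw [hB]
    exact Nat.zero_le _
  · have : ∀ w ∈ gws, PySem.Str.isIn l (String.ofList [w.toList.getD i.toNat ' '])
        = (String.ofList [w.toList.getD i.toNat ' '] == l) := fun w _ => pv_isIn_single l _ hl
    rw [List.filter_congr this]

-- ===== VERDICT (by name: the statement is the Claim_ definition above) =====
theorem badPos_spec : Claim_unchanged_badPos := by
  intro bad_pos gws _ hpre hnd
  rw [pv_A_flat bad_pos gws hpre, pv_B_flat bad_pos gws hpre]
  unfold D_badPos at hnd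
  push Not at hnd
  by_cases hg : gws = []
  · subst hg; simp
  · have hno := hnd hg
    apply congrArg List.flatten
    apply List.map_congr_left
    intro p hp
    apply congrArg List.flatten
    apply List.map_congr_left
    intro l hl
    have hle : l ≠ "" := by
      intro h; subst h; exact (hno p hp) hl
    apply List.filter_congr
    intro w _
    exact pv_isIn_single l _ hle

theorem badPos_changed : Claim_changed_badPos := by
  unfold Claim_changed_badPos; decide

theorem badPos_tight : Claim_exact_badPos := by
  intro bad_pos gws _ hpre hd heq
  obtain ⟨hg, p₀, hp₀, hmem⟩ := hd
  have hlen := congrArg List.length heq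
  rw [pv_A_flat bad_pos gws hpre, pv_B_flat bad_pos gws hpre] at hlen
  simp only [List.length_flatMap] at hlen
  have hlt : ((((PySem.Dict.ofList bad_pos).items.zip (PySem.List.pyRange 0 5 1)).map
        (fun p => (p.1.2.map (fun l =>
          (gws.filter (fun w => String.ofList [w.toList.getD p.2.toNat ' '] == l)).length)).sum)).sum
      < (((PySem.Dict.ofList bad_pos).items.zip (PySem.List.pyRange 0 5 1)).map
        (fun p => (p.1.2.map (fun l =>
          (gws.filter (fun w => PySem.Str.isIn l (String.ofList [w.toList.getD p.2.toNat ' ']))).length)).sum)).sum) := by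
    apply pv_sum_lt _ _ _ ?hle p₀ hp₀
    · apply pv_sum_lt _ _ _ (fun l _ => pv_filters gws p₀.2 l) "" hmem
      have hB : gws.filter (fun w => String.ofList [w.toList.getD p₀.2.toNat ' '] == "") = [] := by
        apply List.filter_eq_nil_iff.mpr
        intro w _
        simp [pv_single_ne_empty]
      have hA : gws.filter (fun w => PySem.Str.isIn "" (String.ofList [w.toList.getD p₀.2.toNat ' '])) = gws := by
        apply List.filter_eq_self.mpr
        intro w _
        exact pv_isIn_empty _
      rw [hA, hB]
      simpa [List.length_pos_iff] using hg
    · intro p _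
      exact pv_sum_le _ _ _ (fun l _ => pv_filters gws p.2 l)
  omega
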